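-- pv_equiv track=rewrite | github.com/lizhongyi123/AVAS_control | utils/treatlist.py | list_one_two
-- ===== SOURCE A (Python) =====
-- import copy
--
-- def list_one_two(x, y):
--     x = copy.deepcopy(x)
--     y = copy.deepcopy(y)
--     """
--     x: 要改变形状的列表
--     y: 目标形状列表
--     """
--     for i in range(len(y)):
--         for j in range(len(y[i])):
--             if x:
--                 y[int(i)][int(j)] = x.pop(0)
--     return y
-- ===== SOURCE B (Python) =====
-- def list_one_two(x, y):
--     out = []
--     k = 0
--     for row in y:
--         take = x[k:k+len(row)]
--         out.append(take + row[len(take):])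
--         k += len(row)
--     return out
-- ===== Notes on version B (the rewrite author's own statement) =====
-- stated objective: simpler
-- what changed: Replaces the nested per-cell loops with destructive pop(0)/index assignment by a single pass that builds each output row from a slice of x at a running offset plus the untouched tail of the template row.
import Mathlib
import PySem

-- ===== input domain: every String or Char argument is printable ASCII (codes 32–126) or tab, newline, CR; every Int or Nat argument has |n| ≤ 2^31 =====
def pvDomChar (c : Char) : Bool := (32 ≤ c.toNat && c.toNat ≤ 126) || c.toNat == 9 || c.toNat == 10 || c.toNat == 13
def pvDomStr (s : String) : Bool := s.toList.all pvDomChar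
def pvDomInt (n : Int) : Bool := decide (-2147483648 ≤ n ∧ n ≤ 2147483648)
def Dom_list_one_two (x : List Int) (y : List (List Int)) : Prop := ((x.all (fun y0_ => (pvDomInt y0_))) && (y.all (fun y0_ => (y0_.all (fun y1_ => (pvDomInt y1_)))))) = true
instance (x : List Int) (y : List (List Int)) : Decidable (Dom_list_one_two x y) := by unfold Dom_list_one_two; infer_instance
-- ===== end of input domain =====

-- B replaces A's nested per-cell loops (with pop(0)) by one slice-at-a-running-offset pass per row; objective: simpler.
-- A deep-copies its arguments, so neither version mutates the caller's lists.

-- ===== PORT A =====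
-- A fills the cells of row r one by one, popping from the front of x while x is nonempty;
-- this is the inner 'for j' loop with its 'if x' check, as structural recursion over the row.
def pvFillRowA : List Int → List Int → List Int × List Int
  | x, [] => (x, [])
  | [], c :: cs =>
      let p := pvFillRowA [] cs
      ([], c :: p.2)
  | v :: rest, _ :: cs =>
      let p := pvFillRowA rest cs
      (p.1, v :: p.2)

-- the outer 'for i in range(len(y))' loop, threading the remaining x through the rows
def list_one_two (x : List Int) (y : List (List Int)) : List (List Int) :=
  match y with
  | [] => []
  | r :: rs =>
      let p := pvFillRowA x r
      p.2 :: list_one_two p.1 rs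

-- ===== PORT B =====
-- Source B: running offset k; each output row is x[k:k+len(row)] ++ row[len(take):]
-- (k and the slice bounds are nonnegative, so the slice is exactly drop k / take len(row)).
def list_one_two_alt (x : List Int) (y : List (List Int)) : List (List Int) :=
  (y.foldl
    (fun (st : List (List Int)  × Nat) row =>
      let take := (x.drop st.2).take row.length
      (st.1 ++ [take ++ row.drop take.length], st.2 + row.length))
    (([] : List (List Int)), 0)).1

-- ===== PRECONDITION & SPEC =====
def Spec_list_one_two (x : List Int) (y : List (List Int)) (out : List (List Int)) : Prop := out = list_one_two_alt x y
instance (x : List Int) (y : List (List Int)) (out : List (List Int)) : Decidable (Spec_list_one_two x y out) := by unfold Spec_list_one_two; infer_instance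

-- ===== CLAIM (what is proved, stated in full; the proofs are below) =====
def Claim_equal_list_one_two : Prop := ∀ (x : List Int) (y : List (List Int)), Dom_list_one_two x y → Spec_list_one_two x y (list_one_two x y)

-- ===== LEMMAS AND PROOFS =====

theorem pvFillRowA_eq (r x : List Int) :
    pvFillRowA x r = (x.drop r.length, (x.take r.length) ++ r.drop (x.take r.length).length) := by
  induction r generalizing x with
  | nil => simp [pvFillRowA]
  | cons c cs ih =>
      cases x with
      | nil => simp [pvFillRowA, ih]
      | cons v rest => simp [pvFillRowA, ih]

theorem pvFoldB_eq (x : List Int) (y : List (List Int)) :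
    ∀ (acc : List (List Int)) (k : Nat),
      (y.foldl
        (fun (st : List (List Int) × Nat) row =>
          let take := (x.drop st.2).take row.length
          (st.1 ++ [take ++ row.drop take.length], st.2 + row.length))
        (acc, k)).1 = acc ++ list_one_two (x.drop k) y := by
  induction y with
  | nil => intro acc k; simp [list_one_two]
  | cons r rs ih =>
      intro acc k
      simp only [List.foldl_cons]
      rw [ih]
      simp [list_one_two, pvFillRowA_eq, List.drop_drop, Nat.add_comm k r.length]

-- ===== VERDICT (by name: the statement is the Claim_ definition above) =====
theorem list_one_two_spec : Claim_equal_list_one_two := by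
  intro x y _
  unfold Spec_list_one_two list_one_two_alt
  rw [pvFoldB_eq]
  simp
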